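-- pv_equiv track=rewrite | github.com/joaldi2208/R-Finder | scripts/r_finder.py | filterInvalidMatches
-- ===== SOURCE A (Python) =====
-- def filterInvalidMatches(match_strings, match_locations):
--     """
--     This function is only needed if there are mistakes done by tesseract-ocr.
--     It filters invalid R-Group matches, which are defined in a list in this function. It is mainly about R=R which is sometimes catched by reading the R-Groups in the structure as R-Group definition, while the equal sign is wrong translated from tesseract-ocr
--     """
--     invalid_matches = ["R=R", "R:R", "R = R", "R : R", "R = etc."] # replace it with regex
--     index_of_invalid_matches = []
--
--     for index, match in enumerate(match_strings):
--         if match in invalid_matches: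
--             index_of_invalid_matches.append(index)
--
--     for index in sorted(index_of_invalid_matches, reverse=True):
--         del match_strings[index]
--         del match_locations[index]
--
--
--     return match_strings, match_locations
-- ===== SOURCE B (Python) =====
-- def filterInvalidMatches(match_strings, match_locations):
--     invalid_matches = {"R=R", "R:R", "R = R", "R : R", "R = etc."}
--     removed = {i for i, m in enumerate(match_strings) if m in invalid_matches}
--     match_strings[:] = [m for i, m in enumerate(match_strings) if i not in removed]
--     match_locations[:] = [loc for i, loc in enumerate(match_locations) if i not in removed]
--     return match_strings, match_locations
-- ===== Notes on version B (the rewrite author's own statement) =====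
-- stated objective: simpler
-- what changed: Replaces the two-phase collect-invalid-indices-then-delete-in-reverse (each del is an O(n) shift) with a removed-index set and one keep-pass comprehension per list, assigned in place via slice assignment; Pre_ excludes only inputs where A raises IndexError (an invalid match at an index beyond len(match_locations)).
import Mathlib
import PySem

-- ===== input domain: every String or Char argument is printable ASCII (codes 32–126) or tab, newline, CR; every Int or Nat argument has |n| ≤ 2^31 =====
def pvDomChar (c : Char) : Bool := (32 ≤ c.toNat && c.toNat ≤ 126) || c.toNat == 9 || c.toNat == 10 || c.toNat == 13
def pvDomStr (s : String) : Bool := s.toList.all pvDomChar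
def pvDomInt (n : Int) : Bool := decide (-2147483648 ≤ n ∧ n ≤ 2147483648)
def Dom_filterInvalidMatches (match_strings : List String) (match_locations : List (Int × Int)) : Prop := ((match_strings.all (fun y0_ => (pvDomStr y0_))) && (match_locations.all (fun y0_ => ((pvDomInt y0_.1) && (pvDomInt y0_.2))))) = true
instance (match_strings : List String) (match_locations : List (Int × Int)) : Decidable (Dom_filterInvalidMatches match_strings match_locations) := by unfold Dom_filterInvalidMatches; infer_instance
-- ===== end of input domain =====

-- B replaces A's collect-indices-then-delete-in-reverse with a removed-index set driving
-- one keep-pass per list; objective: simpler. Both Pythons mutate their argument lists in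
-- place (A via del, B via slice assignment); the equivalence proved here is about the
-- RETURN value (which aliases those lists).

-- ===== PORT A =====
-- 'del xs[i]' at the nonnegative in-range indices guaranteed by Pre_ is List.eraseIdx i.toNat
def filterInvalidMatches (match_strings : List String) (match_locations : List (Int × Int)) : List String × (List (Int × Int)) :=
  let invalid_matches : List String := ["R=R", "R:R", "R = R", "R : R", "R = etc."]
  let index_of_invalid_matches : List Int :=
    (PySem.List.enumerate match_strings).foldl
      (fun acc p => if invalid_matches.contains p.2 then acc ++ [p.1] else acc) []
  (PySem.List.sorted index_of_invalid_matches (fun x => x) true).foldl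
    (fun st i => (st.1.eraseIdx i.toNat, st.2.eraseIdx i.toNat))
    (match_strings, match_locations)

-- ===== PORT B =====
-- the set comprehension 'removed' is consumed only through membership tests, so its
-- hash order is irrelevant; it is ported as PySem.Set.ofList of the index list
def filterInvalidMatches_alt (match_strings : List String) (match_locations : List (Int × Int)) : List String × (List (Int × Int)) :=
  let invalid_matches : List String := ["R=R", "R:R", "R = R", "R : R", "R = etc."]
  let removed : PySem.Set Int := PySem.Set.ofList
    (((PySem.List.enumerate match_strings).filter (fun p => invalid_matches.contains p.2)).map (·.1))
  (((PySem.List.enumerate match_strings).filter (fun p => !(PySem.Set.contains removed p.1))).map (·.2),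
   ((PySem.List.enumerate match_locations).filter (fun p => !(PySem.Set.contains removed p.1))).map (·.2))

-- ===== PRECONDITION & SPEC =====
-- Pre_ excludes exactly the inputs where Python A raises IndexError: an invalid match at an
-- index not smaller than len(match_locations), whose 'del match_locations[index]' fails.
def Pre_filterInvalidMatches (match_strings : List String) (match_locations : List (Int × Int)) : Prop :=
  ∀ i : Nat, i < match_strings.length →
    (["R=R", "R:R", "R = R", "R : R", "R = etc."].contains (match_strings.getD i "")) = true →
    i < match_locations.length
instance (match_strings : List String) (match_locations : List (Int × Int)) : Decidable (Pre_filterInvalidMatches match_strings match_locations) := by unfold Pre_filterInvalidMatches; infer_instance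
def pvWitness_filterInvalidMatches : List String × (List (Int × Int)) :=
  (["R=R", "abc", "R : R"], [(1, 2), (3, 4), (5, 6)])

def Spec_filterInvalidMatches (match_strings : List String) (match_locations : List (Int × Int)) (out : List String × (List (Int × Int))) : Prop := out = filterInvalidMatches_alt match_strings match_locations
instance (match_strings : List String) (match_locations : List (Int × Int)) (out : List String × (List (Int × Int))) : Decidable (Spec_filterInvalidMatches match_strings match_locations out) := by unfold Spec_filterInvalidMatches; infer_instance

-- ===== CLAIM (what is proved, stated in full; the proofs are below) =====
def Claim_equal_filterInvalidMatches : Prop := ∀ (match_strings : List String) (match_locations : List (Int × Int)), Dom_filterInvalidMatches match_strings match_locations → Pre_filterInvalidMatches match_strings match_locations → Spec_filterInvalidMatches match_strings match_locations (filterInvalidMatches match_strings match_locations)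

-- ===== LEMMAS AND PROOFS =====

-- keepFrom I n xs: xs with the elements whose absolute index (counting from n) lies in I removed.
def keepFrom {α : Type} (I : List Int) : Nat → List α → List α
  | _, [] => []
  | n, x :: xs => if (n : Int) ∈ I then keepFrom I (n+1) xs else x :: keepFrom I (n+1) xs

theorem keepFrom_all {α : Type} (I : List Int) : ∀ (xs : List α) (n : Nat),
    (∀ k ∈ I, k < (n : Int)) → keepFrom I n xs = xs := by
  intro xs
  induction xs with
  | nil => intro n _; rfl
  | cons x xs ih =>
    intro n h
    have : ((n : Int) ∈ I) = False := by
      simp only [eq_iff_iff, iff_false]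
      intro hm; exact absurd (h _ hm) (by omega)
    simp [keepFrom, this, ih (n+1) (fun k hk => by have := h k hk; omega)]

theorem erase_keepFrom {α : Type} (rest : List Int) (j : Nat)
    (hlt : ∀ k ∈ rest, k < (j : Int)) :
    ∀ (xs : List α) (n : Nat), n ≤ j →
      keepFrom rest n (xs.eraseIdx (j - n)) = keepFrom ((j : Int) :: rest) n xs := by
  intro xs
  induction xs with
  | nil => intro n _; simp [List.eraseIdx, keepFrom]
  | cons x xs ih =>
    intro n hn
    by_cases hnj : n = j
    · subst hnj
      simp only [Nat.sub_self, List.eraseIdx_cons_zero, keepFrom, List.mem_cons, true_or,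
        if_pos]
      rw [keepFrom_all rest _ n hlt,
        keepFrom_all ((n : Int) :: rest) xs (n+1) (by
          intro k hk
          rcases List.mem_cons.mp hk with h | h
          · omega
          · have := hlt k h; omega)]
    · have hn' : n < j := by omega
      have : j - n = (j - (n+1)) + 1 := by omega
      rw [this, List.eraseIdx_cons_succ]
      have hmem : ((n : Int) ∈ ((j : Int) :: rest)) ↔ ((n : Int) ∈ rest) := by
        simp only [List.mem_cons, or_iff_right_iff_imp]
        intro h; exfalso; omega
      by_cases hm : (n : Int) ∈ rest
      · simp only [keepFrom, if_pos hm, if_pos (hmem.mpr hm)]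
        exact ih (n+1) (by omega)
      · simp only [keepFrom, if_neg hm, if_neg (fun h => hm (hmem.mp h))]
        rw [ih (n+1) (by omega)]

theorem foldl_erase {α β : Type} : ∀ (I : List Int) (xs : List α) (ys : List β),
    I.Pairwise (fun a b => b < a) → (∀ k ∈ I, 0 ≤ k) →
    I.foldl (fun st i => (st.1.eraseIdx i.toNat, st.2.eraseIdx i.toNat)) (xs, ys)
      = (keepFrom I 0 xs, keepFrom I 0 ys) := by
  intro I
  induction I with
  | nil => intro xs ys _ _; simp [keepFrom_all]
  | cons j rest ih =>
    intro xs ys hp hnn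
    have h1 : ∀ k ∈ rest, k < j := (List.pairwise_cons.mp hp).1
    have h0j : 0 ≤ j := hnn j (List.mem_cons_self ..)
    have hj : ((j.toNat : Nat) : Int) = j := Int.toNat_of_nonneg h0j
    have h1' : ∀ k ∈ rest, k < ((j.toNat : Nat) : Int) := by rw [hj]; exact h1
    simp only [List.foldl_cons]
    rw [ih _ _ (List.pairwise_cons.mp hp).2 (fun k hk => hnn k (List.mem_cons_of_mem _ hk))]
    have ex : ∀ {γ : Type} (zs : List γ),
        keepFrom rest 0 (zs.eraseIdx j.toNat) = keepFrom ((j : Int) :: rest) 0 zs := by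
      intro γ zs
      have := erase_keepFrom rest j.toNat h1' zs 0 (Nat.zero_le _)
      rw [Nat.sub_zero] at this
      rw [this, hj]
    rw [ex xs, ex ys]

theorem foldl_collect (inv : List String) :
    ∀ (l : List (Int × String)) (acc : List Int),
      l.foldl (fun a q => if inv.contains q.2 then a ++ [q.1] else a) acc
        = acc ++ (l.filter (fun q => inv.contains q.2)).map (·.1) := by
  intro l
  induction l with
  | nil => simp
  | cons q l ih =>
    intro acc
    rw [List.foldl_cons, ih, List.filter_cons]
    by_cases hx : q.2 ∈ inv
    · simp [hx]
    · simp [hx]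

-- membership in the invalid-index list
theorem mem_idxs (ms : List String) (i : Int) :
    (i ∈ ((PySem.List.enumerate ms).filter
        (fun p => (["R=R", "R:R", "R = R", "R : R", "R = etc."] : List String).contains p.2)).map (·.1))
      ↔ ∃ k : Nat, (i = (k : Int)) ∧ ∃ h : k < ms.length,
          (["R=R", "R:R", "R = R", "R : R", "R = etc."] : List String).contains ms[k] = true := by
  simp only [List.mem_map, List.mem_filter, PySem.List.mem_enumerate_iff]
  constructor
  · rintro ⟨p, ⟨⟨k, hk, rfl⟩, hc⟩, rfl⟩
    exact ⟨k, by simp, hk, by simpa using hc⟩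
  · rintro ⟨k, rfl, hk, hc⟩
    exact ⟨((k : Int), ms[k]), ⟨⟨k, hk, by simp⟩, hc⟩, rfl⟩

theorem keepFrom_enum {α : Type} (I : List Int) (q : Int × α → Bool)
    (hq : ∀ (k : Nat) (x : α), q ((k : Int), x) = !(decide ((k : Int) ∈ I))) :
    ∀ (ys : List α) (n : Nat),
      keepFrom I n ys = ((PySem.List.enumerate ys n).filter q).map (·.2) := by
  intro ys
  induction ys with
  | nil => intro n; simp [keepFrom, PySem.List.enumerate_nil]
  | cons y ys ih =>
    intro n
    rw [PySem.List.enumerate_cons]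
    by_cases hm : (n : Int) ∈ I
    · simp [keepFrom, hm, hq n y, ih (n+1)]
    · simp [keepFrom, hm, hq n y, ih (n+1)]

-- ===== VERDICT (by name: the statement is the Claim_ definition above) =====
theorem filterInvalidMatches_spec : Claim_equal_filterInvalidMatches := by
  unfold Claim_equal_filterInvalidMatches
  intro ms ml _ _
  unfold Spec_filterInvalidMatches filterInvalidMatches filterInvalidMatches_alt
  simp only []
  set inv : List String := ["R=R", "R:R", "R = R", "R : R", "R = etc."] with hinv
  -- A's first loop collects the invalid indices, in increasing order
  rw [foldl_collect inv]
  set I : List Int := ((PySem.List.enumerate ms).filter (fun p => inv.contains p.2)).map (·.1) with hI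
  have hmemI : ∀ i : Int, i ∈ I ↔ ∃ k : Nat, (i = (k : Int)) ∧ ∃ h : k < ms.length,
      inv.contains ms[k] = true := by
    intro i; exact mem_idxs ms i
  have hpair : I.Pairwise (· < ·) := by
    have := PySem.List.pairwise_lt_enumerate (xs := ms) (s := 0)
    exact (this.filter _).map _ (fun _ _ h => h)
  have hnn : ∀ k ∈ I, 0 ≤ k := by
    intro k hk; rcases (hmemI k).mp hk with ⟨m, rfl, _⟩; omega
  -- sorted(I, reverse=True) is I.reverse
  have hsorted : PySem.List.sorted I (fun x => x) true = I.reverse := by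
    apply PySem.List.sorted_rev_eq_of_perm_of_pairwise_gt
    · exact List.reverse_perm I
    · simpa [List.pairwise_reverse] using hpair
  rw [List.nil_append, hsorted]
  have hpairrev : I.reverse.Pairwise (fun a b => b < a) := by
    simpa [List.pairwise_reverse] using hpair
  have hnnrev : ∀ k ∈ I.reverse, 0 ≤ k := by
    intro k hk; exact hnn k (List.mem_reverse.mp hk)
  rw [foldl_erase I.reverse ms ml hpairrev hnnrev]
  -- B's 'removed' set has the same members as I
  have hq : ∀ (β : Type) (k : Nat) (x : β),
      (!(PySem.Set.contains (PySem.Set.ofList I) ((k : Int), x).1))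
        = !(decide (((k : Nat) : Int) ∈ I.reverse)) := by
    intro β k x
    by_cases hm : ((k : Nat) : Int) ∈ I
    · simp [PySem.Set.mem_ofList, hm]
    · simp [PySem.Set.mem_ofList, hm]
  rw [Prod.mk.injEq]
  exact ⟨keepFrom_enum I.reverse _ (hq String) ms 0,
         keepFrom_enum I.reverse _ (hq (Int × Int)) ml 0⟩
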